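-- pv_equiv track=rewrite | github.com/Yun04kaGasai/Bifithon | tools/bifc.py | split_assignment
-- ===== SOURCE A (Python) =====
-- def split_assignment(line: str):
--     for i, ch in enumerate(line):
--         if ch != "=":
--             continue
--         prev = line[i - 1] if i > 0 else ""
--         nxt = line[i + 1] if i + 1 < len(line) else ""
--         if prev in ("=", "!", "<", ">") or nxt == "=":
--             continue
--         return line[:i].strip(), line[i + 1 :].strip()
--     return None
-- ===== SOURCE B (Python) =====
-- def split_assignment(line: str):
--     # One forward pass over an iterator with one-character lookahead and an
--     # accumulator of consumed characters; no index arithmetic, no slicing.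
--     left = []
--     prev = None
--     it = iter(line)
--     ch = next(it, None)
--     while ch is not None:
--         nxt = next(it, None)
--         if ch == "=" and prev not in ("=", "!", "<", ">") and nxt != "=":
--             right = ("" if nxt is None else nxt) + "".join(it)
--             return "".join(left).strip(), right.strip()
--         left.append(ch)
--         prev, ch = ch, nxt
--     return None
-- ===== Notes on version B (the rewrite author's own statement) =====
-- stated objective: alternative
-- what changed: Replaces the enumerate loop with index arithmetic (line[i-1], line[i+1], two slices) by a single forward pass over an iterator with one-character lookahead and an accumulator of the consumed prefix, using no indexing or slicing at all.
import Mathlib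
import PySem

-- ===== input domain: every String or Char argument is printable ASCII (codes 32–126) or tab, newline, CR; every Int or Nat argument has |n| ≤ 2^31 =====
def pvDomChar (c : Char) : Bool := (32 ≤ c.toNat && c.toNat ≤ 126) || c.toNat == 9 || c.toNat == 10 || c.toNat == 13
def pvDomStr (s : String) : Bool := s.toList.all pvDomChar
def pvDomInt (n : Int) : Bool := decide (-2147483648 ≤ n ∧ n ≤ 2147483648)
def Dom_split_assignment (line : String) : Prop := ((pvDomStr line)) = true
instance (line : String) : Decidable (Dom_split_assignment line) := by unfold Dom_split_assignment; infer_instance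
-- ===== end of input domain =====

-- B replaces A's indexed scan (line[i-1]/line[i+1]/slices) by one forward pass with
-- a lookahead character and an accumulator of the consumed prefix (alternative decomposition).

-- ===== PORT A =====
-- the enumerate loop: recursion over the remaining characters with the running index i;
-- Python's 1-char strings line[i-1]/line[i+1] and the default "" are ported as Option Char
-- (some c ↔ the 1-char string, none ↔ ""), which is exact for the membership/equality tests.
def split_assignment_goA (line : List Char) (i : Nat) : List Char → Option (String × String)
  | [] => none
  | ch :: rest =>
    if ch ≠ '=' then split_assignment_goA line (i + 1) rest
    else
      let prev : Option Char := if i > 0 then PySem.List.pyGet? line ((i : Int) - 1) else none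
      let nxt : Option Char := if i + 1 < line.length then PySem.List.pyGet? line ((i : Int) + 1) else none
      if prev ∈ [some '=', some '!', some '<', some '>'] ∨ nxt = some '=' then
        split_assignment_goA line (i + 1) rest
      else
        some (PySem.Str.strip (String.ofList (PySem.List.slice line none (some (i : Int)))),
              PySem.Str.strip (String.ofList (PySem.List.slice line (some ((i : Int) + 1)) none)))

def split_assignment (line : String) : Option (String × String) :=
  split_assignment_goA line.toList 0 line.toList

-- ===== PORT B =====
-- the while loop over the iterator: ch is the current character, nxt the lookahead
-- (rest.head? = next(it, None)), prev the previously consumed character, left the consumed prefix.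
def split_assignment_goB (prev : Option Char) (left : List Char) : List Char → Option (String × String)
  | [] => none
  | ch :: rest =>
    let nxt : Option Char := rest.head?
    if ch = '=' ∧ prev ∉ [some '=', some '!', some '<', some '>'] ∧ nxt ≠ some '=' then
      let right : List Char := (match nxt with | none => [] | some c => c :: rest.tail)
      some (PySem.Str.strip (String.ofList left), PySem.Str.strip (String.ofList right))
    else
      split_assignment_goB (some ch) (left ++ [ch]) rest

def split_assignment_alt (line : String) : Option (String × String) :=
  split_assignment_goB none [] line.toList

-- ===== PRECONDITION & SPEC =====
def Spec_split_assignment (line : String) (out : Option (String × String)) : Prop := out = split_assignment_alt line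
instance (line : String) (out : Option (String × String)) : Decidable (Spec_split_assignment line out) := by unfold Spec_split_assignment; infer_instance

-- ===== CLAIM (what is proved, stated in full; the proofs are below) =====
def Claim_equal_split_assignment : Prop := ∀ (line : String), Dom_split_assignment line → Spec_split_assignment line (split_assignment line)

-- ===== LEMMAS AND PROOFS =====

theorem split_assignment_go_eq (rest acc : List Char) :
    split_assignment_goA (acc ++ rest) acc.length rest
      = split_assignment_goB acc.getLast? acc rest := by
  induction rest generalizing acc with
  | nil => simp [split_assignment_goA, split_assignment_goB]
  | cons ch rest ih =>
    have hrec : split_assignment_goA (acc ++ ch :: rest) (acc.length + 1) rest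
        = split_assignment_goB (some ch) (acc ++ [ch]) rest := by
      have h := ih (acc ++ [ch])
      simpa [List.append_assoc] using h
    have hprev : (if acc.length > 0 then
        PySem.List.pyGet? (acc ++ ch :: rest) ((acc.length : Int) - 1) else none) = acc.getLast? := by
      by_cases h : acc = []
      · subst h; simp
      · have hpos : 0 < acc.length := List.length_pos_iff.mpr h
        have hc : ((acc.length : Int) - 1) = ((acc.length - 1 : Nat) : Int) := by omega
        rw [if_pos hpos, hc, PySem.List.pyGet?_natCast,
          List.getElem?_append_left (by omega), List.getLast?_eq_getElem?]
    have hnxt : (if acc.length + 1 < (acc ++ ch :: rest).length then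
        PySem.List.pyGet? (acc ++ ch :: rest) ((acc.length : Int) + 1) else none) = rest.head? := by
      cases rest with
      | nil => simp
      | cons b bs =>
        rw [if_pos (by simp)]
        have hc : ((acc.length : Int) + 1) = ((acc.length + 1 : Nat) : Int) := by push_cast; ring
        rw [hc, PySem.List.pyGet?_natCast, List.getElem?_append_right (by omega)]
        simp
    have hleft : PySem.List.slice (acc ++ ch :: rest) none (some (acc.length : Int)) = acc := by
      rw [PySem.List.slice_to_natCast, List.take_left]
    have hright : PySem.List.slice (acc ++ ch :: rest) (some ((acc.length : Int) + 1)) none = rest := by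
      have hc : ((acc.length : Int) + 1) = ((acc.length + 1 : Nat) : Int) := by push_cast; ring
      rw [hc, PySem.List.slice_from_natCast]
      simp
    have hmatch : (match rest.head? with | none => ([] : List Char) | some c => c :: rest.tail) = rest := by
      cases rest <;> simp
    simp only [split_assignment_goA, split_assignment_goB, hprev, hnxt, hleft, hright, hmatch]
    by_cases hch : ch = '='
    · simp only [hch, ne_eq, not_true_eq_false, if_false, true_and]
      by_cases hcond : acc.getLast? ∈ [some '=', some '!', some '<', some '>'] ∨ rest.head? = some '='
      · rw [if_pos hcond, if_neg (by tauto)]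
        exact hch ▸ hrec
      · rw [if_neg hcond, if_pos (by tauto)]
    · rw [if_pos (by simpa using hch), if_neg (by tauto)]
      exact hrec

-- ===== VERDICT (by name: the statement is the Claim_ definition above) =====
theorem split_assignment_spec : Claim_equal_split_assignment := by
  intro line _
  unfold Spec_split_assignment split_assignment split_assignment_alt
  simpa using split_assignment_go_eq line.toList []
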